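-- pv_equiv track=rewrite | github.com/NVIDIA/NeMo | nemo/collections/nlp/nm/non_trainables/dialogue_state_tracking/template_nlg_multiwoz.py | truncate_sys_response
-- ===== SOURCE A (Python) =====
-- def truncate_sys_response(sys_uttr):
--     """
--     Truncates system response when too many questions are asked by the system
--     Args:
--         sys_uttr (str): generated system response
--     Returns:
--         (str): updated system response
--     """
--     start_idx = 0
--     utterances_with_period = []
--     utterances_with_question_mark = []
--     for idx, ch in enumerate(sys_uttr):
--         if ch == '?':
--             utterances_with_question_mark.append((sys_uttr[start_idx : idx + 1]).strip())
--             start_idx = idx + 1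
--         elif ch == '.':
--             utterances_with_period.append((sys_uttr[start_idx : idx + 1]).strip())
--             start_idx = idx + 1
--
--     if len(utterances_with_question_mark) > 0:
--         utterances_with_question_mark = utterances_with_question_mark[:1]
--
--     return ' '.join(utterances_with_period) + ' '.join(utterances_with_question_mark)
-- ===== SOURCE B (Python) =====
-- def truncate_sys_response(sys_uttr):
--     """Tokenize into '.'/'?'-terminated segments, then classify by last character."""
--     segments = []
--     cur = []
--     for ch in sys_uttr:
--         cur.append(ch)
--         if ch in '.?':
--             segments.append(''.join(cur).strip())
--             cur = []
--     periods = [seg for seg in segments if seg.endswith('.')]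
--     questions = [seg for seg in segments if seg.endswith('?')]
--     return ' '.join(periods) + ' '.join(questions[:1])
-- ===== Notes on version B (the rewrite author's own statement) =====
-- stated objective: idiomatic
-- what changed: Replaces A's index/start_idx slicing scan (which appends to the period and question lists inside the loop, slicing the original string each time) by a tokenize-then-classify decomposition: one pass cuts the string into delimiter-terminated segments, then two comprehensions classify the segments by their final character and the joins read from those.
import Mathlib
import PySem

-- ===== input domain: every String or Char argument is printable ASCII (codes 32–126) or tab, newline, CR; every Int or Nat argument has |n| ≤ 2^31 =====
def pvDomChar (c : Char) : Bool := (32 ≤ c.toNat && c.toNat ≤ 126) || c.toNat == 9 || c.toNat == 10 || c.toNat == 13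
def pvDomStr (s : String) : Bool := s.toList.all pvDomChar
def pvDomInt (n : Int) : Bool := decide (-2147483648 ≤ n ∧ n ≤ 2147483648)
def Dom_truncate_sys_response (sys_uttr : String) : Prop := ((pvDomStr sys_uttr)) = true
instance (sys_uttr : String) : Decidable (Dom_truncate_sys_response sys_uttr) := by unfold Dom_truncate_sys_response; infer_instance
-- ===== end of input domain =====

-- B replaces A's index/slice scan by tokenize-then-classify (segments built once, then
-- filtered by their final character); same behaviour, more idiomatic decomposition.

-- ===== PORT A =====
-- loop body of A's `for idx, ch in enumerate(sys_uttr)` (state: start_idx, periods, questions)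
def truncA_step (cs : List Char) (st : Int × List (List Char) × List (List Char))
    (p : Int × Char) : Int × List (List Char) × List (List Char) :=
  if p.2 = '?' then
    (p.1 + 1, st.2.1,
      st.2.2 ++ [PySem.Chars.strip (PySem.List.slice cs (some st.1) (some (p.1 + 1)))])
  else if p.2 = '.' then
    (p.1 + 1,
      st.2.1 ++ [PySem.Chars.strip (PySem.List.slice cs (some st.1) (some (p.1 + 1)))],
      st.2.2)
  else st

def truncate_sys_response (sys_uttr : String) : String :=
  let cs := sys_uttr.toList
  let st := (PySem.List.enumerate cs 0).foldl (truncA_step cs) (0, [], [])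
  let ques := if st.2.2.length > 0 then st.2.2.take 1 else st.2.2
  String.ofList (PySem.Chars.join [' '] st.2.1 ++ PySem.Chars.join [' '] ques)

-- ===== PORT B =====
-- loop body of B's `for ch in sys_uttr` (state: segments, cur)
def truncB_step (st : List (List Char) × List Char) (ch : Char) :
    List (List Char) × List Char :=
  let cur := st.2 ++ [ch]
  if ch = '.' ∨ ch = '?' then (st.1 ++ [PySem.Chars.strip cur], []) else (st.1, cur)

def truncate_sys_response_alt (sys_uttr : String) : String :=
  let st := sys_uttr.toList.foldl truncB_step ([], [])
  let periods := st.1.filter (fun seg => PySem.Chars.endswith seg ['.'])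
  let questions := st.1.filter (fun seg => PySem.Chars.endswith seg ['?'])
  String.ofList (PySem.Chars.join [' '] periods ++ PySem.Chars.join [' '] (questions.take 1))

-- ===== PRECONDITION & SPEC =====
def Spec_truncate_sys_response (sys_uttr : String) (out : String) : Prop := out = truncate_sys_response_alt sys_uttr
instance (sys_uttr : String) (out : String) : Decidable (Spec_truncate_sys_response sys_uttr out) := by unfold Spec_truncate_sys_response; infer_instance

-- ===== CLAIM (what is proved, stated in full; the proofs are below) =====
def Claim_equal_truncate_sys_response : Prop := ∀ (sys_uttr : String), Dom_truncate_sys_response sys_uttr → Spec_truncate_sys_response sys_uttr (truncate_sys_response sys_uttr)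

-- ===== LEMMAS AND PROOFS =====

-- the stripped '.'/'?'-terminated segments of a string, cur = chars since the last delimiter
def segsAux (cur : List Char) : List Char → List (List Char)
  | [] => []
  | c :: t =>
    if c = '.' ∨ c = '?' then PySem.Chars.strip (cur ++ [c]) :: segsAux [] t
    else segsAux (cur ++ [c]) t

lemma strip_concat (xs : List Char) (c : Char) (h : PySem.Chars.isspace c = false) :
    PySem.Chars.strip (xs ++ [c]) = List.dropWhile PySem.Chars.isspace xs ++ [c] := by
  unfold PySem.Chars.strip PySem.Chars.lstrip PySem.Chars.rstrip
  have hl : List.dropWhile PySem.Chars.isspace (xs ++ [c]) =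
      List.dropWhile PySem.Chars.isspace xs ++ [c] := by
    rw [List.dropWhile_append]
    by_cases he : (List.dropWhile PySem.Chars.isspace xs).isEmpty
    · simp only [List.isEmpty_iff] at he
      simp [he, h]
    · simp [he]
  rw [hl, List.reverse_append]
  simp [List.dropWhile, h]

lemma endswith_concat (ys : List Char) (c d : Char) :
    PySem.Chars.endswith (ys ++ [c]) [d] = decide (d = c) := by
  unfold PySem.Chars.endswith
  by_cases hdc : d = c
  · subst hdc
    simp [List.isSuffixOf_iff_suffix]
  · rw [decide_eq_false hdc]
    apply Bool.eq_false_iff.mpr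
    intro hT
    obtain ⟨zs, hz⟩ := List.isSuffixOf_iff_suffix.mp hT
    have := congrArg List.getLast? hz
    simp at this
    exact hdc this

lemma endswith_strip_delim (cur : List Char) (c d : Char)
    (hs : PySem.Chars.isspace c = false) :
    PySem.Chars.endswith (PySem.Chars.strip (cur ++ [c])) [d] = decide (d = c) := by
  rw [strip_concat cur c hs, endswith_concat]

lemma take_succ_concat (L : List Char) (s k : ℕ) (c : Char) (t' : List Char)
    (hsk : s ≤ k) (ht : L.drop k = c :: t') :
    (L.drop s).take (k + 1 - s) = (L.drop s).take (k - s) ++ [c] := by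
  have hk : k < L.length := by
    by_contra hge
    rw [not_lt] at hge
    simp [List.drop_eq_nil_of_le hge] at ht
  have h2 : (L.drop s).drop (k - s) = c :: t' := by
    rw [List.drop_drop, Nat.add_sub_cancel' hsk, ht]
  have hlen : k - s ≤ (L.drop s).length := by
    simp [List.length_drop]; omega
  conv_lhs => rw [← List.take_append_drop (k - s) (L.drop s), h2]
  rw [List.take_append, List.take_take, Nat.min_eq_right (by omega),
    List.length_take, Nat.min_eq_left hlen,
    show k + 1 - s - (k - s) = 1 from by omega]
  simp

lemma foldB_segs : ∀ (t : List Char) (segs : List (List Char)) (cur : List Char),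
    (t.foldl truncB_step (segs, cur)).1 = segs ++ segsAux cur t := by
  intro t
  induction t with
  | nil => intro segs cur; simp [segsAux]
  | cons c t ih =>
    intro segs cur
    simp only [List.foldl_cons, segsAux]
    by_cases hc : c = '.' ∨ c = '?'
    · simp [truncB_step, hc, ih]
    · simp [truncB_step, hc, ih]

set_option maxRecDepth 4000 in
lemma foldA_spec (L : List Char) :
    ∀ (t : List Char) (k s : ℕ) (pers ques : List (List Char)),
    s ≤ k → t = L.drop k →
    ((PySem.List.enumerate t (k : Int)).foldl (truncA_step L) (((s : ℕ) : Int), pers, ques)).2 =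
      (pers ++ (segsAux ((L.drop s).take (k - s)) t).filter
                 (fun seg => PySem.Chars.endswith seg ['.']),
       ques ++ (segsAux ((L.drop s).take (k - s)) t).filter
                 (fun seg => PySem.Chars.endswith seg ['?'])) := by
  intro t
  induction t with
  | nil => intro k s pers ques _ _; simp [PySem.List.enumerate, segsAux]
  | cons c t ih =>
    intro k s pers ques hsk ht
    have hdrop : t = L.drop (k + 1) := by
      have h := congrArg (List.drop 1) ht
      simpa [List.drop_drop, Nat.add_comm] using h
    have hslice : PySem.List.slice L (some ((s : ℕ) : Int)) (some ((k : Int) + 1)) =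
        (L.drop s).take (k - s) ++ [c] := by
      rw [show ((k : Int) + 1) = (((k + 1 : ℕ)) : Int) from by push_cast; ring,
        PySem.List.slice_natCast]
      exact take_succ_concat L s k c t hsk ht.symm
    have hcast1 : (k : Int) + 1 = ((k + 1 : ℕ) : Int) := by push_cast; ring
    rw [PySem.List.enumerate_cons, List.foldl_cons]
    by_cases hq : c = '?'
    · subst hq
      have hstep : truncA_step L (((s : ℕ) : Int), pers, ques) ((k : Int), '?') =
          (((k + 1 : ℕ) : Int), pers,
            ques ++ [PySem.Chars.strip ((L.drop s).take (k - s) ++ ['?'])]) := by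
        dsimp only [truncA_step]
        rw [if_pos rfl, hslice]
        norm_num
      rw [hstep, hcast1,
        ih (k + 1) (k + 1) pers (ques ++ [PySem.Chars.strip ((L.drop s).take (k - s) ++ ['?'])])
          (le_refl _) hdrop]
      have h1 : PySem.Chars.endswith (PySem.Chars.strip ((L.drop s).take (k - s) ++ ['?'])) ['.']
          = false := by
        rw [endswith_strip_delim _ _ _ (by decide)]; decide
      have h2 : PySem.Chars.endswith (PySem.Chars.strip ((L.drop s).take (k - s) ++ ['?'])) ['?']
          = true := by
        rw [endswith_strip_delim _ _ _ (by decide)]; decide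
      have hseg : segsAux ((L.drop s).take (k - s)) ('?' :: t) =
          PySem.Chars.strip ((L.drop s).take (k - s) ++ ['?']) :: segsAux [] t := by
        simp [segsAux]
      rw [hseg]
      simp [h1, h2]
    · by_cases hp : c = '.'
      · subst hp
        have hstep : truncA_step L (((s : ℕ) : Int), pers, ques) ((k : Int), '.') =
            (((k + 1 : ℕ) : Int),
              pers ++ [PySem.Chars.strip ((L.drop s).take (k - s) ++ ['.'])], ques) := by
          dsimp only [truncA_step]
          rw [if_neg (by decide), if_pos rfl, hslice]
          norm_num
        rw [hstep, hcast1,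
          ih (k + 1) (k + 1) (pers ++ [PySem.Chars.strip ((L.drop s).take (k - s) ++ ['.'])]) ques
            (le_refl _) hdrop]
        have h1 : PySem.Chars.endswith (PySem.Chars.strip ((L.drop s).take (k - s) ++ ['.'])) ['.']
            = true := by
          rw [endswith_strip_delim _ _ _ (by decide)]; decide
        have h2 : PySem.Chars.endswith (PySem.Chars.strip ((L.drop s).take (k - s) ++ ['.'])) ['?']
            = false := by
          rw [endswith_strip_delim _ _ _ (by decide)]; decide
        have hseg : segsAux ((L.drop s).take (k - s)) ('.' :: t) =
            PySem.Chars.strip ((L.drop s).take (k - s) ++ ['.']) :: segsAux [] t := by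
          simp [segsAux]
        rw [hseg]
        simp [h1, h2]
      · have hstep : truncA_step L (((s : ℕ) : Int), pers, ques) ((k : Int), c) =
            (((s : ℕ) : Int), pers, ques) := by
          dsimp only [truncA_step]
          rw [if_neg hq, if_neg hp]
        rw [hstep, hcast1, ih (k + 1) s pers ques (by omega) hdrop]
        have hseg : segsAux ((L.drop s).take (k - s)) (c :: t) =
            segsAux ((L.drop s).take (k + 1 - s)) t := by
          rw [take_succ_concat L s k c t hsk ht.symm]
          simp [segsAux, hq, hp]
        rw [hseg]

-- ===== VERDICT (by name: the statement is the Claim_ definition above) =====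
theorem truncate_sys_response_spec : Claim_equal_truncate_sys_response := by
  unfold Claim_equal_truncate_sys_response Spec_truncate_sys_response
  intro s _
  unfold truncate_sys_response truncate_sys_response_alt
  have hA := foldA_spec s.toList s.toList 0 0 [] [] (le_refl _) (by simp)
  simp only [Nat.cast_zero, Nat.sub_self, List.drop_zero, List.take_zero, List.nil_append] at hA
  have h21 := congrArg Prod.fst hA
  have h22 := congrArg Prod.snd hA
  simp only [] at h21 h22
  have hB := foldB_segs s.toList [] []
  simp only [List.nil_append] at hB
  simp only [h21, h22, hB]
  cases hq : (segsAux [] s.toList).filter (fun seg => PySem.Chars.endswith seg ['?']) with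
  | nil => simp
  | cons a l => simp
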